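-- pv_equiv track=rewrite | github.com/desilvsj/TR-Errors-dev | final/src/refiner_pipeline.py | find_exact_consensus_match
-- ===== SOURCE A (Python) =====
-- from typing import Tuple, Optional
--
-- def find_exact_consensus_match(ref_seq: str, double_consensus: str, kallisto_index: int) -> Tuple[Optional[int], Optional[bool]]:
--     # Search for an exact single-consensus (length d) within DC, but only at or
--     # after Kallisto's suggested reference index. Returns (ref_pos, phi).
--     # Note: Type hint suggests 3-tuple, but function returns 2 values; callers
--     # correctly unpack 2. Consider fixing signature to -> Tuple[Optional[int], Optional[int]].
--     d = len(double_consensus) // 2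
--     for phi in range(d + 1):
--         candidate = double_consensus[phi:phi + d]
--         pos = ref_seq.find(candidate, kallisto_index)
--         if pos != -1:
--             return pos, phi
--     return None, None
-- ===== SOURCE B (Python) =====
-- from typing import Tuple, Optional
--
-- def find_exact_consensus_match(ref_seq: str, double_consensus: str, kallisto_index: int) -> Tuple[Optional[int], Optional[bool]]:
--     # One backward pass over ref_seq builds a hash map from every length-d
--     # window (at or after the normalized start) to its earliest position;
--     # each candidate phi is then a single O(d) dictionary lookup.
--     d = len(double_consensus) // 2
--     n = len(ref_seq)
--     start = kallisto_index + n if kallisto_index < 0 else kallisto_index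
--     if start < 0:
--         start = 0
--     earliest = {}
--     for pos in range(n - d, start - 1, -1):
--         earliest[ref_seq[pos:pos + d]] = pos
--     for phi in range(d + 1):
--         hit = earliest.get(double_consensus[phi:phi + d])
--         if hit is not None:
--             return hit, phi
--     return None, None
-- ===== Notes on version B (the rewrite author's own statement) =====
-- stated objective: alternative
-- what changed: A scans ref_seq once per candidate (str.find for each of the d+1 phi-windows); B makes one backward pass over ref_seq that indexes every length-d window in a dict keyed by window string (earliest position wins) and then answers each candidate with a single dict lookup.
import Mathlib
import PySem

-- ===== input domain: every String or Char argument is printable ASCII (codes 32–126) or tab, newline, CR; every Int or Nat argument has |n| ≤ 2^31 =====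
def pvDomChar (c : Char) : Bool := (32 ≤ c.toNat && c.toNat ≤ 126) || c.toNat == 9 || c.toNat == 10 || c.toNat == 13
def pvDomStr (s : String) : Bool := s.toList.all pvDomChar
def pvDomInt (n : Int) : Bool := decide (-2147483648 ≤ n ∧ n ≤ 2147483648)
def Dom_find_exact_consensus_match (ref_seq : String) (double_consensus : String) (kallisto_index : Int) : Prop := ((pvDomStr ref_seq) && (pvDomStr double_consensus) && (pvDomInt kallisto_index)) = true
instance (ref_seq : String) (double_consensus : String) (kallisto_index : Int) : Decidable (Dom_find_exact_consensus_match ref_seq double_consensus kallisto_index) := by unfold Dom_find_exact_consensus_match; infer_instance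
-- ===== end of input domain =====

-- B replaces A's per-phi scan of ref_seq (str.find for each of the d+1 candidates) by one backward
-- pass that hashes every length-d window of ref_seq into a dict keyed by window (earliest position
-- wins), so each candidate becomes a single dict lookup; alternative algorithm, same return value.

-- ===== PORT A =====
-- the 'for phi in range(d + 1)' loop with its early return
def pvAFind (ref_seq double_consensus : String) (kallisto_index d : Int) : List Int → Option Int × Option Int
  | [] => (none, none)
  | phi :: rest =>
    let candidate := PySem.Str.slice double_consensus (some phi) (some (phi + d))
    let pos := PySem.Str.findFrom ref_seq candidate kallisto_index
    if pos ≠ -1 then (some pos, some phi) else pvAFind ref_seq double_consensus kallisto_index d rest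

def find_exact_consensus_match (ref_seq : String) (double_consensus : String) (kallisto_index : Int) : Option Int × Option Int :=
  let d := PySem.Int.floordiv (PySem.Str.len double_consensus) 2
  pvAFind ref_seq double_consensus kallisto_index d (PySem.List.pyRange 0 (d + 1) 1)

-- ===== PORT B =====
-- 'for pos in range(n - d, start - 1, -1): earliest[ref_seq[pos:pos+d]] = pos'
def pvBBuild (ref_seq : String) (d : Int) : List Int → PySem.Dict String Int → PySem.Dict String Int
  | [], acc => acc
  | p :: rest, acc => pvBBuild ref_seq d rest (acc.insert (PySem.Str.slice ref_seq (some p) (some (p + d))) p)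

-- 'for phi in range(d + 1): hit = earliest.get(...); if hit is not None: return hit, phi'
def pvBQuery (double_consensus : String) (d : Int) (earliest : PySem.Dict String Int) : List Int → Option Int × Option Int
  | [] => (none, none)
  | phi :: rest =>
    match earliest.get? (PySem.Str.slice double_consensus (some phi) (some (phi + d))) with
    | some hit => (some hit, some phi)
    | none => pvBQuery double_consensus d earliest rest

def find_exact_consensus_match_alt (ref_seq : String) (double_consensus : String) (kallisto_index : Int) : Option Int × Option Int :=
  let d := PySem.Int.floordiv (PySem.Str.len double_consensus) 2
  let n := PySem.Str.len ref_seq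
  let start0 := if kallisto_index < 0 then kallisto_index + n else kallisto_index
  let start := if start0 < 0 then 0 else start0
  let earliest := pvBBuild ref_seq d (PySem.List.pyRange (n - d) (start - 1) (-1)) PySem.Dict.empty
  pvBQuery double_consensus d earliest (PySem.List.pyRange 0 (d + 1) 1)

-- ===== PRECONDITION & SPEC =====
def Spec_find_exact_consensus_match (ref_seq : String) (double_consensus : String) (kallisto_index : Int) (out : Option Int × Option Int) : Prop := out = find_exact_consensus_match_alt ref_seq double_consensus kallisto_index
instance (ref_seq : String) (double_consensus : String) (kallisto_index : Int) (out : Option Int × Option Int) : Decidable (Spec_find_exact_consensus_match ref_seq double_consensus kallisto_index out) := by unfold Spec_find_exact_consensus_match; infer_instance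

-- ===== CLAIM (what is proved, stated in full; the proofs are below) =====
def Claim_equal_find_exact_consensus_match : Prop := ∀ (ref_seq : String) (double_consensus : String) (kallisto_index : Int), Dom_find_exact_consensus_match ref_seq double_consensus kallisto_index → Spec_find_exact_consensus_match ref_seq double_consensus kallisto_index (find_exact_consensus_match ref_seq double_consensus kallisto_index)

-- ===== LEMMAS AND PROOFS =====

lemma pv_find?_pyRange_none (f : Int → Bool) (a b : Int)
    (h : ∀ q, a ≤ q → q < b → f q = false) :
    (PySem.List.pyRange a b 1).find? f = none := by
  induction hk : (b - a).toNat generalizing a with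
  | zero =>
    rw [PySem.List.pyRange_one_eq_nil (by omega)]; rfl
  | succ k ih =>
    have hab : a < b := by omega
    rw [PySem.List.pyRange_one_cons hab, List.find?_cons_of_neg (by simp [h a le_rfl hab])]
    exact ih (a + 1) (fun q h1 h2 => h q (by omega) h2) (by omega)
lemma pv_find?_pyRange_some (f : Int → Bool) (a b p : Int)
    (h1 : a ≤ p) (h2 : p < b) (hp : f p = true)
    (hmin : ∀ q, a ≤ q → q < p → f q = false) :
    (PySem.List.pyRange a b 1).find? f = some p := by
  induction hk : (p - a).toNat generalizing a with
  | zero =>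
    have : a = p := by omega
    subst this
    rw [PySem.List.pyRange_one_cons (by omega), List.find?_cons_of_pos hp]
  | succ k ih =>
    have hap : a < p := by omega
    rw [PySem.List.pyRange_one_cons (by omega), List.find?_cons_of_neg (by simp [hmin a le_rfl hap])]
    exact ih (a + 1) (by omega) (fun q hq1 hq2 => hmin q (by omega) hq2) (by omega)
lemma pv_build_get? (ref_seq : String) (d : Int) (ps : List Int) (acc : PySem.Dict String Int) (w : String) :
    (pvBBuild ref_seq d ps acc).get? w =
      ((ps.reverse.find? (fun p => PySem.Str.slice ref_seq (some p) (some (p + d)) == w)).or (acc.get? w)) := by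
  induction ps generalizing acc with
  | nil => simp [pvBBuild]
  | cons p rest ih =>
    rw [pvBBuild, ih, List.reverse_cons, List.find?_append, Option.or_assoc]
    congr 1
    by_cases hpw : PySem.Str.slice ref_seq (some p) (some (p + d)) = w
    · simp [List.find?, hpw]
    · have hb : (PySem.Str.slice ref_seq (some p) (some (p + d)) == w) = false := beq_eq_false_iff_ne.mpr hpw
      simp [List.find?, hb, PySem.Dict.get?_insert, Ne.symm hpw]
lemma pv_window_eq_iff (ref w : String) (pN D : Nat) (hw : w.toList.length = D) :
    ((PySem.Str.slice ref (some (pN : Int)) (some ((pN : Int) + (D : Int))) = w) ↔ (w.toList <+: ref.toList.drop pN)) := by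
  rw [← String.toList_inj]
  simp only [PySem.Str.toList_slice, PySem.Chars.slice_eq_listSlice, PySem.List.slice_natCast_add]
  constructor
  · intro h; rw [← h]; exact List.take_prefix _ _
  · intro h; rw [List.prefix_iff_eq_take] at h; rw [← hw, ← h]
lemma pv_findFrom_past (L W : List Char) (s : Int) (h0 : 0 ≤ s) (h : (L.length : Int) < s) :
    PySem.Chars.findFrom L W s none = -1 := by
  simp only [PySem.Chars.findFrom, if_neg (not_lt.mpr h0)]
  rw [if_pos (by omega)]
lemma pv_findFrom_norm (L W : List Char) (ki s : Int)
    (hs : s = if (if ki < 0 then ki + (L.length : Int) else ki) < 0 then 0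
              else (if ki < 0 then ki + (L.length : Int) else ki)) :
    PySem.Chars.findFrom L W ki none = PySem.Chars.findFrom L W s none := by
  simp only [PySem.Chars.findFrom]
  have hst : (if ki < 0 then if ki + (L.length:Int) < 0 then 0 else ki + (L.length:Int) else ki)
      = (if s < 0 then if s + (L.length:Int) < 0 then 0 else s + (L.length:Int) else s) := by
    split_ifs at hs ⊢ <;> omega
  rw [hst]

lemma pv_get_eq (ref_seq w : String) (ki d s : Int) (D : Nat)
    (hd : d = (D : Int)) (hw : w.toList.length = D)
    (hs : s = if (if ki < 0 then ki + (ref_seq.toList.length : Int) else ki) < 0 then 0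
              else (if ki < 0 then ki + (ref_seq.toList.length : Int) else ki)) :
    (pvBBuild ref_seq d (PySem.List.pyRange ((ref_seq.toList.length : Int) - d) (s - 1) (-1)) PySem.Dict.empty).get? w
      = (if PySem.Str.findFrom ref_seq w ki none = -1 then none
         else some (PySem.Str.findFrom ref_seq w ki none)) := by
  have hs0 : 0 ≤ s := by rw [hs]; split_ifs <;> omega
  set L := ref_seq.toList with hL
  set n : Nat := L.length with hn
  rw [pv_build_get?]
  simp only [PySem.Dict.get?_empty, Option.or_none]
  rw [PySem.List.pyRange_neg_one_eq_reverse, List.reverse_reverse]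
  rw [show s - 1 + 1 = s by ring]
  rw [PySem.Str.findFrom_eq, pv_findFrom_norm L w.toList ki s (by rw [hs])]
  by_cases hns : (n : Int) < s
  · rw [pv_findFrom_past L w.toList s hs0 hns, if_pos rfl]
    apply pv_find?_pyRange_none
    intro q hq1 hq2
    exfalso; omega
  · rw [not_lt] at hns
    obtain ⟨k, hk⟩ : ∃ k : Nat, (k : Int) = s := ⟨s.toNat, Int.toNat_of_nonneg hs0⟩
    have hkn : k ≤ n := by omega
    rw [← hk, PySem.Chars.findFrom_natCast L w.toList k hkn]
    set r := PySem.Chars.find (L.drop k) w.toList with hr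
    by_cases hrn : r = -1
    · rw [if_pos hrn]
      apply pv_find?_pyRange_none
      intro q hq1 hq2
      rw [beq_eq_false_iff_ne]
      intro hqe
      obtain ⟨qN, hqN⟩ : ∃ qN : Nat, (qN : Int) = q := ⟨q.toNat, Int.toNat_of_nonneg (by omega)⟩
      rw [← hqN, hd] at hqe
      have hpre : w.toList <+: L.drop qN := (pv_window_eq_iff ref_seq w qN D hw).mp hqe
      have hdk : w.toList <+: (L.drop k).drop (qN - k) := by
        rw [List.drop_drop, show k + (qN - k) = qN by omega]; exact hpre
      have hin : ∃ j, w.toList <+: (L.drop k).drop j := ⟨qN - k, hdk⟩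
      rw [PySem.Chars.exists_prefix_drop_iff_isIn, PySem.Chars.isIn_iff_infix] at hin
      exact (PySem.Chars.find_eq_neg_one_iff _ _).mp hrn hin
    · have hr0 : 0 ≤ r := by
        have := PySem.Chars.neg_one_le_find (L.drop k) w.toList
        rw [← hr] at this; omega
      rw [if_neg hrn, if_neg (by omega)]
      obtain ⟨rN, hrN⟩ : ∃ rN : Nat, (rN : Int) = r := ⟨r.toNat, Int.toNat_of_nonneg hr0⟩
      obtain ⟨hpre, hmin⟩ := PySem.Chars.find_spec (s := L.drop k) (sub := w.toList) hr0
      have hrtoNat : r.toNat = rN := by omega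
      rw [hrtoNat] at hpre hmin
      have hlen : k + rN + D ≤ n := by
        have h1 := hpre.length_le
        rw [List.length_drop, List.length_drop, hw] at h1
        have h2 := PySem.Chars.find_le_length (L.drop k) w.toList
        rw [← hr, List.length_drop] at h2
        omega
      apply pv_find?_pyRange_some _ _ _ ((k : Int) + r)
      · exact le_add_of_nonneg_right hr0
      · omega
      · rw [beq_iff_eq, ← hrN, hd]
        rw [show (k : Int) + (rN : Int) = ((k + rN : Nat) : Int) by push_cast; ring]
        apply (pv_window_eq_iff ref_seq w (k + rN) D hw).mpr
        rw [List.drop_drop] at hpre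
        exact hpre
      · intro q hq1 hq2
        rw [beq_eq_false_iff_ne]
        intro hqe
        obtain ⟨qN, hqN⟩ : ∃ qN : Nat, (qN : Int) = q := ⟨q.toNat, Int.toNat_of_nonneg (by omega)⟩
        rw [← hqN, hd] at hqe
        have hpre' : w.toList <+: L.drop qN := (pv_window_eq_iff ref_seq w qN D hw).mp hqe
        have hdk : w.toList <+: (L.drop k).drop (qN - k) := by
          rw [List.drop_drop, show k + (qN - k) = qN by omega]; exact hpre'
        exact hmin (qN - k) (by omega) hdk

lemma pv_loops_eq (ref_seq double_consensus : String) (ki d : Int) (earliest : PySem.Dict String Int)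
    (phis : List Int)
    (h : ∀ phi ∈ phis,
      earliest.get? (PySem.Str.slice double_consensus (some phi) (some (phi + d)))
        = (if PySem.Str.findFrom ref_seq (PySem.Str.slice double_consensus (some phi) (some (phi + d))) ki none = -1 then none
           else some (PySem.Str.findFrom ref_seq (PySem.Str.slice double_consensus (some phi) (some (phi + d))) ki none))) :
    pvAFind ref_seq double_consensus ki d phis = pvBQuery double_consensus d earliest phis := by
  induction phis with
  | nil => rfl
  | cons phi rest ih =>
    simp only [pvAFind, pvBQuery]
    rw [h phi List.mem_cons_self]
    by_cases hpos : PySem.Str.findFrom ref_seq (PySem.Str.slice double_consensus (some phi) (some (phi + d))) ki none = -1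
    · simp only [hpos, ite_not]
      exact ih (fun p hp => h p (List.mem_cons_of_mem _ hp))
    · simp only [ite_not, if_neg hpos]

lemma pv_candidate_len (dc : String) (phi : Int) (D : Nat)
    (h0 : 0 ≤ phi) (h1 : phi ≤ (D : Int)) (hD : D = dc.toList.length / 2) :
    (PySem.Str.slice dc (some phi) (some (phi + (D : Int)))).toList.length = D := by
  obtain ⟨pN, hpN⟩ : ∃ pN : Nat, (pN : Int) = phi := ⟨phi.toNat, Int.toNat_of_nonneg h0⟩
  rw [← hpN]
  simp only [PySem.Str.toList_slice, PySem.Chars.slice_eq_listSlice, PySem.List.slice_natCast_add]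
  rw [List.length_take, List.length_drop]
  omega

-- ===== VERDICT (by name: the statement is the Claim_ definition above) =====
theorem find_exact_consensus_match_spec : Claim_equal_find_exact_consensus_match := by
  intro ref_seq double_consensus kallisto_index _
  unfold Spec_find_exact_consensus_match
  simp only [find_exact_consensus_match, find_exact_consensus_match_alt]
  have hlr : PySem.Str.len ref_seq = (ref_seq.toList.length : Int) := by
    simp [pysem]
  have hld : PySem.Str.len double_consensus = (double_consensus.toList.length : Int) := by
    simp [pysem]
  have hD : PySem.Int.floordiv ((double_consensus.toList.length : Int)) 2
      = ((double_consensus.toList.length / 2 : Nat) : Int) := by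
    have := PySem.Int.floordiv_eq_ediv_of_pos (a := (double_consensus.toList.length : Int)) (b := 2) (by norm_num)
    omega
  rw [hlr, hld, hD]
  apply pv_loops_eq
  intro phi hphi
  rw [PySem.List.mem_pyRange_one] at hphi
  exact pv_get_eq ref_seq _ kallisto_index _ _ (double_consensus.toList.length / 2) rfl
    (pv_candidate_len double_consensus phi _ hphi.1 (by omega) rfl) rfl
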